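-- pv_equiv track=rewrite | github.com/BokijonovM/Python_Projects | dummy_numbers_finder.py | dummy_numbers
-- ===== SOURCE A (Python) =====
-- def dummy_numbers(an):
--     if an == 0:
--         yield 0
--     elif an == 1:
--         yield 0
--         yield 1
--     else:
--         an_2, an_1 = None, None
--         for an_0 in dummy_numbers(an - 1):
--             an_2, an_1 = an_1, an_0
--             yield an_0
--         yield (an_2 + 1) * an_1
-- ===== SOURCE B (Python) =====
-- def dummy_numbers(an):
--     # Iterative single pass: keep only the last two terms instead of
--     # re-generating the whole prefix recursively at every level.
--     if an < 0:
--         raise ValueError("an must be non-negative")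
--     if an == 0:
--         yield 0
--         return
--     yield 0
--     yield 1
--     a2, a1 = 0, 1
--     for _ in range(an - 1):
--         a2, a1 = a1, (a2 + 1) * a1
--         yield a1
-- ===== Notes on version B (the rewrite author's own statement) =====
-- stated objective: simpler
-- what changed: Replaces the nested recursive generators (each level re-yields the whole output of the level below) by a single iterative loop that tracks only the last two terms and yields each term once.
import Mathlib
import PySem

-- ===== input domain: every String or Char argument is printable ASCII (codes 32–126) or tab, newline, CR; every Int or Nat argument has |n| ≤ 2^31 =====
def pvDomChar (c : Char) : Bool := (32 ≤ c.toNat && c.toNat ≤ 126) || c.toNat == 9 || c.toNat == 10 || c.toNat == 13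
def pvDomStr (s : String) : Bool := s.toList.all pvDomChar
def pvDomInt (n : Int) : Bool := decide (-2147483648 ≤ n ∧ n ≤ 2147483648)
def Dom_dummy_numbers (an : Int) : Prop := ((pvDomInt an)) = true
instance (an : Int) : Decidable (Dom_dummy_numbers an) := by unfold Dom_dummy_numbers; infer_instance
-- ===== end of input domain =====

-- B replaces A's nested recursive generators by a single loop keeping the last two terms (simpler; no speed claimed).
-- The ports return the LIST of yielded values of each generator.

-- ===== PORT A =====
-- A's recursion steps an down by 1; on Nat fuel = an.toNat (Pre_ excludes an < 0, where Python recurses forever).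
-- The loop 'an_2, an_1 = an_1, an_0' over the inner generator is the foldl over the previous list;
-- an_2/an_1 start as None, hence Option Int ('.getD 0' is unreachable for an ≥ 2: the inner list has ≥ 2 elements).
def dummyNumbersA : Nat → List Int
  | 0 => [0]
  | 1 => [0, 1]
  | n + 2 =>
    let prev := dummyNumbersA (n + 1)
    let st : Option Int × Option Int :=
      prev.foldl (fun p an_0 => (p.2, some an_0)) (none, none)
    prev ++ [((st.1.getD 0) + 1) * (st.2.getD 0)]

def dummy_numbers (an : Int) : List Int := dummyNumbersA an.toNat

-- ===== PORT B =====
-- Source B raises ValueError for an < 0: no value there; that branch is outside Pre_ and ported as [].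
def dummy_numbers_alt (an : Int) : List Int :=
  if an < 0 then []
  else if an == 0 then [0]
  else
    let st := (PySem.List.pyRange 0 (an - 1) 1).foldl
      (fun (s : Int × Int × List Int) _ =>
        let a2 := s.1
        let a1 := s.2.1
        (a1, (a2 + 1) * a1, s.2.2 ++ [(a2 + 1) * a1]))
      (0, 1, [0, 1])
    st.2.2

-- ===== PRECONDITION & SPEC =====
-- Pre_ excludes an < 0, where A's recursion an → an-1 never reaches a base case (RecursionError) and B raises ValueError.
def Pre_dummy_numbers (an : Int) : Prop := 0 ≤ an
instance (an : Int) : Decidable (Pre_dummy_numbers an) := by unfold Pre_dummy_numbers; infer_instance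
def pvWitness_dummy_numbers : Int := (5)

def Spec_dummy_numbers (an : Int) (out : List Int) : Prop := out = dummy_numbers_alt an
instance (an : Int) (out : List Int) : Decidable (Spec_dummy_numbers an out) := by unfold Spec_dummy_numbers; infer_instance

-- ===== CLAIM (what is proved, stated in full; the proofs are below) =====
def Claim_equal_dummy_numbers : Prop := ∀ (an : Int), Dom_dummy_numbers an → Pre_dummy_numbers an → Spec_dummy_numbers an (dummy_numbers an)

-- ===== LEMMAS AND PROOFS =====

-- B's loop body, as a step on the full state (pair of last two terms, list so far).
def bStep (s : Int × Int × List Int) : Int × Int × List Int :=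
  (s.2.1, (s.1 + 1) * s.2.1, s.2.2 ++ [(s.1 + 1) * s.2.1])

-- A's last-two tracking over a list with one more element appended.
lemma lastTwo_append (xs : List Int) (x : Int) (init : Option Int × Option Int) :
    (xs ++ [x]).foldl (fun (p : Option Int × Option Int) a => (p.2, some a)) init
      = ((xs.foldl (fun (p : Option Int × Option Int) a => (p.2, some a)) init).2, some x) := by
  simp [List.foldl_append]

-- Main invariant: after n loop iterations B's state is (last two of A's list, A's list), at level n+1.
lemma invariant (n : ℕ) :
    (List.range n).foldl (fun s _ => bStep s) (0, 1, [0, 1])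
      = (((dummyNumbersA (n + 1)).foldl (fun (p : Option Int × Option Int) a => (p.2, some a)) (none, none)).1.getD 0,
         ((dummyNumbersA (n + 1)).foldl (fun (p : Option Int × Option Int) a => (p.2, some a)) (none, none)).2.getD 0,
         dummyNumbersA (n + 1)) := by
  induction n with
  | zero => simp [dummyNumbersA]
  | succ n ih =>
    rw [List.range_succ, List.foldl_append, ih]
    show bStep _ = _
    have hA : dummyNumbersA (n + 2)
        = dummyNumbersA (n + 1) ++
          [(((dummyNumbersA (n + 1)).foldl (fun (p : Option Int × Option Int) a => (p.2, some a)) (none, none)).1.getD 0 + 1)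
            * ((dummyNumbersA (n + 1)).foldl (fun (p : Option Int × Option Int) a => (p.2, some a)) (none, none)).2.getD 0] := by
      rfl
    rw [hA, lastTwo_append]
    simp [bStep]

-- B's range loop is a List.range fold (the counter is never used).
lemma pyRange_fold (m : ℕ) :
    (PySem.List.pyRange 0 (m : Int) 1).foldl
        (fun (s : Int × Int × List Int) _ =>
          let a2 := s.1
          let a1 := s.2.1
          (a1, (a2 + 1) * a1, s.2.2 ++ [(a2 + 1) * a1]))
        (0, 1, [0, 1])
      = (List.range m).foldl (fun s _ => bStep s) (0, 1, [0, 1]) := by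
  rw [PySem.List.pyRange_one]
  simp only [List.foldl_map]
  rfl

-- A = B for every nonnegative an, by cases on an.toNat.
lemma main (an : Int) (h : 0 ≤ an) : dummy_numbers an = dummy_numbers_alt an := by
  unfold dummy_numbers dummy_numbers_alt
  have hneg : ¬ an < 0 := by omega
  by_cases h0 : an = 0
  · subst h0; simp [dummyNumbersA]
  · simp only [hneg, if_false, beq_iff_eq, h0]
    obtain ⟨m, hm⟩ : ∃ m : ℕ, an = (m : Int) + 1 := by
      refine ⟨(an - 1).toNat, ?_⟩
      omega
    subst hm
    have h1 : ((m : Int) + 1 - 1) = (m : Int) := by ring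
    rw [h1, pyRange_fold, invariant]
    have h2 : ((m : Int) + 1).toNat = m + 1 := by omega
    rw [h2]

-- ===== VERDICT (by name: the statement is the Claim_ definition above) =====
theorem dummy_numbers_spec : Claim_equal_dummy_numbers := by
  intro an _ hpre
  exact main an hpre
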